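-- pv_equiv track=rewrite | github.com/anon-hiktyq/FSE2026-ASGSE | src/LoopInvGen/inv_gen.py | append_array_annotations
-- ===== SOURCE A (Python) =====
-- def append_array_annotations(annotations,array_name,unchanged_arrays):
--     updated_code = []
--     if array_name in unchanged_arrays:
--         invariant_annotation = f"loop invariant PLACE_HOLDER_UNCHANGED_ARRAY_{array_name} ;"
--     else:
--         invariant_annotation = f"loop invariant PLACE_HOLDER_ARRAY_{array_name} ;"
--     found_first_annotation = False
--
--     for line in annotations.splitlines():
--         if not found_first_annotation and '/*@' in line:
--         # Append the current line
--             updated_code.append(line)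
--         # Insert the invariant annotations below the first occurrence of /*@
--             updated_code.append(f"          {invariant_annotation}")
--             found_first_annotation = True
--         else:
--         # Keep other lines as they are
--             updated_code.append(line)
--
--    # Join the list back into a single string and return
--     return "\n".join(updated_code)
-- ===== SOURCE B (Python) =====
-- def append_array_annotations(annotations, array_name, unchanged_arrays):
--     if array_name in unchanged_arrays:
--         invariant_annotation = f"loop invariant PLACE_HOLDER_UNCHANGED_ARRAY_{array_name} ;"
--     else:
--         invariant_annotation = f"loop invariant PLACE_HOLDER_ARRAY_{array_name} ;"
--     lines = annotations.splitlines()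
--     i = next((k for k, line in enumerate(lines) if '/*@' in line), None)
--     if i is None:
--         return "\n".join(lines)
--     return "\n".join(lines[:i + 1] + [f"          {invariant_annotation}"] + lines[i + 1:])
-- ===== Notes on version B (the rewrite author's own statement) =====
-- stated objective: simpler
-- what changed: Replaces A's single pass that threads a (updated_code, found) accumulator and appends line-by-line with a find-first-index over the lines followed by a slice splice lines[:i+1] + [indented annotation] + lines[i+1:].
import Mathlib
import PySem

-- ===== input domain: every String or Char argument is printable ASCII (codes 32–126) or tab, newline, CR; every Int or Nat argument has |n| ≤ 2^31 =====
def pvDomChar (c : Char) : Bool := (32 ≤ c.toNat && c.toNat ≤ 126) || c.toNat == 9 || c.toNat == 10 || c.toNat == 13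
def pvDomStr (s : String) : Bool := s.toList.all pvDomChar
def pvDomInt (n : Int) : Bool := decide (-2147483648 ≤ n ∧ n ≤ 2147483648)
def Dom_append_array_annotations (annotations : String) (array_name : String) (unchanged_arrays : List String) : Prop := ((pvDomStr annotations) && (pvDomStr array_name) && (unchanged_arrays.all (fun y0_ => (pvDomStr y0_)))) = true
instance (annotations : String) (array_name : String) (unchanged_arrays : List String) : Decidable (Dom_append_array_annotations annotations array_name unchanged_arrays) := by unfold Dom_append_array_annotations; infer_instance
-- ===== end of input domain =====

-- B replaces A's flag-carrying accumulator loop by find-first-index + slice splice (same cost; objective: simpler decomposition).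

-- ===== PORT A =====
-- A's loop body: state = (updated_code, found_first_annotation), ind = the already-indented invariant line
def stepA (ind : String) (p : String → Bool) (st : List String × Bool) (line : String) : List String × Bool :=
  if !st.2 && p line then (st.1 ++ [line, ind], true) else (st.1 ++ [line], st.2)

def append_array_annotations (annotations : String) (array_name : String) (unchanged_arrays : List String) : String :=
  let invariant_annotation : String :=
    if unchanged_arrays.contains array_name then
      "loop invariant PLACE_HOLDER_UNCHANGED_ARRAY_" ++ array_name ++ " ;"
    else
      "loop invariant PLACE_HOLDER_ARRAY_" ++ array_name ++ " ;"
  let st := (PySem.Str.splitlines annotations).foldl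
    (stepA ("          " ++ invariant_annotation) (fun line => PySem.Str.isIn "/*@" line))
    ([], false)
  PySem.Str.join "\n" st.1

-- ===== PORT B =====
def append_array_annotations_alt (annotations : String) (array_name : String) (unchanged_arrays : List String) : String :=
  let invariant_annotation : String :=
    if unchanged_arrays.contains array_name then
      "loop invariant PLACE_HOLDER_UNCHANGED_ARRAY_" ++ array_name ++ " ;"
    else
      "loop invariant PLACE_HOLDER_ARRAY_" ++ array_name ++ " ;"
  let lines := PySem.Str.splitlines annotations
  match lines.findIdx? (fun line => PySem.Str.isIn "/*@" line) with
  | none => PySem.Str.join "\n" lines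
  | some i =>
      PySem.Str.join "\n"
        (lines.take (i + 1) ++ ["          " ++ invariant_annotation] ++ lines.drop (i + 1))

-- ===== PRECONDITION & SPEC =====
def Spec_append_array_annotations (annotations : String) (array_name : String) (unchanged_arrays : List String) (out : String) : Prop := out = append_array_annotations_alt annotations array_name unchanged_arrays
instance (annotations : String) (array_name : String) (unchanged_arrays : List String) (out : String) : Decidable (Spec_append_array_annotations annotations array_name unchanged_arrays out) := by unfold Spec_append_array_annotations; infer_instance

-- ===== CLAIM (what is proved, stated in full; the proofs are below) =====
def Claim_equal_append_array_annotations : Prop := ∀ (annotations : String) (array_name : String) (unchanged_arrays : List String), Dom_append_array_annotations annotations array_name unchanged_arrays → Spec_append_array_annotations annotations array_name unchanged_arrays (append_array_annotations annotations array_name unchanged_arrays)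

-- ===== LEMMAS AND PROOFS =====

theorem stepA_found (ind : String) (p : String → Bool) (acc : List String) (line : String) :
    stepA ind p (acc, true) line = (acc ++ [line], true) := by
  simp [stepA]

theorem stepA_unfound_pos (ind : String) (p : String → Bool) (acc : List String) (line : String)
    (h : p line = true) : stepA ind p (acc, false) line = (acc ++ [line, ind], true) := by
  simp [stepA, h]

theorem stepA_unfound_neg (ind : String) (p : String → Bool) (acc : List String) (line : String)
    (h : p line = false) : stepA ind p (acc, false) line = (acc ++ [line], false) := by
  simp [stepA, h]

-- Once the flag is set, A's loop just appends every remaining line.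
theorem foldl_after_found (ind : String) (p : String → Bool) :
    ∀ (ls acc : List String), ls.foldl (stepA ind p) (acc, true) = (acc ++ ls, true) := by
  intro ls
  induction ls with
  | nil => intro acc; simp
  | cons a ls ih =>
      intro acc
      rw [List.foldl_cons, stepA_found, ih]
      simp

-- A's loop from the unset flag equals B's find-index-then-splice.
theorem foldl_eq_splice (ind : String) (p : String → Bool) :
    ∀ (ls acc : List String),
      (ls.foldl (stepA ind p) (acc, false)).1
      = acc ++ (match ls.findIdx? p with
          | none => ls
          | some i => ls.take (i + 1) ++ [ind] ++ ls.drop (i + 1)) := by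
  intro ls
  induction ls with
  | nil => intro acc; simp
  | cons a ls ih =>
      intro acc
      by_cases h : p a = true
      · rw [List.foldl_cons, stepA_unfound_pos ind p acc a h, foldl_after_found ind p ls]
        simp [List.findIdx?_cons, h]
      · have h' : p a = false := by simp [h]
        rw [List.foldl_cons, stepA_unfound_neg ind p acc a h', ih]
        rcases hfi : ls.findIdx? p with _ | i <;>
          simp [List.findIdx?_cons, h', hfi]

-- ===== VERDICT (by name: the statement is the Claim_ definition above) =====
theorem append_array_annotations_spec : Claim_equal_append_array_annotations := by
  intro annotations array_name unchanged_arrays _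
  unfold Spec_append_array_annotations append_array_annotations append_array_annotations_alt
  simp only
  rw [foldl_eq_splice]
  rcases (PySem.Str.splitlines annotations).findIdx?
      (fun line => PySem.Str.isIn "/*@" line) with _ | i
  · simp
  · simp
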